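-- pv_equiv track=rewrite | github.com/eclemmon/politics_1 | Testing_Scripts/euclidean_rhythm_generator.py | euclidian_splitter
-- ===== SOURCE A (Python) =====
-- def euclidian_splitter(array):
--     # This can be done better....
--     res = []
--     sub_array = []
--     while len(array) > 0:
--         val = array.pop(0)
--         if val == 1:
--             res.append(sub_array)
--             sub_array = [1]
--         else:
--             sub_array.append(val)
--     res.append(sub_array)
--     return res[1:]
-- ===== SOURCE B (Python) =====
-- def euclidian_splitter(array):
--     # Index-table-then-slice: one pass records where the 1s are, then the
--     # groups are contiguous slices between consecutive 1s.
--     ones = [i for i, v in enumerate(array) if v == 1]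
--     res = [array[ones[i]:ones[i + 1]] for i in range(len(ones) - 1)]
--     if ones:
--         res.append(array[ones[-1]:])
--     array.clear()  # the original consumes its input via pop(0); keep that side effect
--     return res
-- ===== Notes on version B (the rewrite author's own statement) =====
-- stated objective: faster
-- what changed: Replaced the pop(0)-driven accumulator-and-branch loop with one pass that records the indices of the 1s and then emits the groups as contiguous slices between consecutive 1s (clearing the list afterwards to keep A's consume-the-input side effect).
import Mathlib
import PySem

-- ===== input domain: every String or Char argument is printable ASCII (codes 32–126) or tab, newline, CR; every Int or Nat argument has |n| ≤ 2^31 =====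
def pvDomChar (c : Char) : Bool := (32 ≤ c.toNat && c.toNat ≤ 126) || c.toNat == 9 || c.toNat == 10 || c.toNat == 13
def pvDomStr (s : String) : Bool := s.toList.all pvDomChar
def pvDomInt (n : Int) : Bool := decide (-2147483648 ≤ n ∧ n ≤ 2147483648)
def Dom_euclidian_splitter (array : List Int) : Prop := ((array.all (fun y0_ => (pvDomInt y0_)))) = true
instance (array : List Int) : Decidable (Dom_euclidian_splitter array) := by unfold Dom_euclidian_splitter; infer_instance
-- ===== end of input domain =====

-- B replaces A's pop(0) loop by an indices-of-1s pass followed by slicing (faster mechanism: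
-- no repeated list shifting). Both Pythons leave `array` empty (A via pop(0), B via clear());
-- the equivalence proved here is about the RETURN value.

-- ===== PORT A =====
-- the while loop: state (array, sub_array, res); pop(0) is the structural head
def esLoopA : List Int → List Int → List (List Int) → List (List Int)
  | [], sub, res => res ++ [sub]
  | v :: rest, sub, res =>
    if v = 1 then esLoopA rest [1] (res ++ [sub]) else esLoopA rest (sub ++ [v]) res

def euclidian_splitter (array : List Int) : List (List Int) :=
  PySem.List.slice (esLoopA array [] []) (some 1) none   -- res[1:]

-- ===== PORT B =====
def euclidian_splitter_alt (array : List Int) : List (List Int) :=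
  -- ones = [i for i, v in enumerate(array) if v == 1]
  let ones : List Int :=
    (PySem.List.enumerate array).filterMap (fun p => if p.2 = 1 then some p.1 else none)
  -- res = [array[ones[i]:ones[i+1]] for i in range(len(ones) - 1)]
  let res : List (List Int) :=
    (PySem.List.pyRange 0 (PySem.List.len ones - 1) 1).map
      (fun i => PySem.List.slice array (some (PySem.List.pyGetD ones i 0))
                                       (some (PySem.List.pyGetD ones (i + 1) 0)))
  -- if ones: res.append(array[ones[-1]:])
  if ones ≠ [] then res ++ [PySem.List.slice array (some (PySem.List.pyGetD ones (-1) 0)) none]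
  else res

-- ===== PRECONDITION & SPEC =====
def Spec_euclidian_splitter (array : List Int) (out : List (List Int)) : Prop := out = euclidian_splitter_alt array
instance (array : List Int) (out : List (List Int)) : Decidable (Spec_euclidian_splitter array out) := by unfold Spec_euclidian_splitter; infer_instance

-- ===== CLAIM (what is proved, stated in full; the proofs are below) =====
def Claim_equal_euclidian_splitter : Prop := ∀ (array : List Int), Dom_euclidian_splitter array → Spec_euclidian_splitter array (euclidian_splitter array)

-- ===== LEMMAS AND PROOFS =====

-- common characterisation: groups of the part starting at the first 1
def esGroups : List Int → List (List Int)
  | [] => []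
  | v :: rest =>
    if v = 1 then (1 :: rest.takeWhile (· ≠ 1)) :: esGroups (rest.dropWhile (· ≠ 1))
    else esGroups rest
termination_by xs => xs.length
decreasing_by
  · exact Nat.lt_succ_of_le (List.length_dropWhile_le _ _)
  · exact Nat.lt_succ_self _

theorem esGroups_nil : esGroups ([] : List Int) = [] := by
  rw [esGroups.eq_def]

theorem esGroups_cons_one (rest : List Int) :
    esGroups (1 :: rest) = (1 :: rest.takeWhile (· ≠ 1)) :: esGroups (rest.dropWhile (· ≠ 1)) := by
  rw [esGroups.eq_def]; simp

theorem esLoopA_eq (xs : List Int) : ∀ (sub : List Int) (res : List (List Int)),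
    esLoopA xs sub res = res ++ [sub ++ xs.takeWhile (· ≠ 1)] ++ esGroups (xs.dropWhile (· ≠ 1)) := by
  induction xs with
  | nil => intro sub res; simp [esLoopA, esGroups]
  | cons v rest ih =>
    intro sub res
    by_cases hv : v = 1
    · subst hv
      rw [esLoopA, if_pos rfl, ih]
      simp [esGroups_cons_one]
    · rw [esLoopA, if_neg hv, ih]
      simp [hv]

def onesOf (xs : List Int) : List Int :=
  (PySem.List.enumerate xs).filterMap (fun p => if p.2 = 1 then some p.1 else none)

-- the slices B emits, written as a direct recursion over the index table
def sliceChain (arr : List Int) : List Int → List (List Int)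
  | [] => []
  | [a] => [PySem.List.slice arr (some a) none]
  | a :: b :: t => PySem.List.slice arr (some a) (some b) :: sliceChain arr (b :: t)

theorem build_res_eq (arr : List Int) (os : List Int) :
    (PySem.List.pyRange 0 (PySem.List.len os - 1) 1).map
      (fun i => PySem.List.slice arr (some (PySem.List.pyGetD os i 0))
                                     (some (PySem.List.pyGetD os (i + 1) 0)))
    = (List.range (os.length - 1)).map
        (fun k => PySem.List.slice arr (some (os.getD k 0)) (some (os.getD (k + 1) 0))) := by
  have hn : (PySem.List.len os - 1).toNat = os.length - 1 := by
    rw [PySem.List.len_eq]; omega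
  rw [PySem.List.pyRange_zero, hn, List.map_map]
  refine List.map_congr_left (fun k _ => ?_)
  simp only [Function.comp_apply]
  rw [(Nat.cast_add_one k).symm, PySem.List.pyGetD_natCast, PySem.List.pyGetD_natCast]

theorem build_eq_chain (arr : List Int) (os : List Int) :
    (if os ≠ [] then
        ((List.range (os.length - 1)).map
          (fun k => PySem.List.slice arr (some (os.getD k 0)) (some (os.getD (k + 1) 0))))
        ++ [PySem.List.slice arr (some (PySem.List.pyGetD os (-1) 0)) none]
      else
        (List.range (os.length - 1)).map
          (fun k => PySem.List.slice arr (some (os.getD k 0)) (some (os.getD (k + 1) 0))))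
    = sliceChain arr os := by
  induction os with
  | nil => simp [sliceChain]
  | cons a t ih =>
    cases t with
    | nil => simp [sliceChain, PySem.List.pyGetD_neg_one]
    | cons b t' =>
      rw [if_pos (by simp)] at ih ⊢
      have hlen : (a :: b :: t').length - 1 = t'.length + 1 := by simp
      rw [hlen, List.range_succ_eq_map, List.map_cons, List.map_map, sliceChain, List.cons_append]
      have hlast : PySem.List.pyGetD (a :: b :: t') (-1) 0 = PySem.List.pyGetD (b :: t') (-1) 0 := by
        rw [PySem.List.pyGetD_neg_one _ _ (by simp), PySem.List.pyGetD_neg_one _ _ (by simp),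
            List.getLast_cons]
      have hmap : List.map ((fun k => PySem.List.slice arr (some ((a :: b :: t').getD k 0))
              (some ((a :: b :: t').getD (k + 1) 0))) ∘ Nat.succ) (List.range (t'.length))
          = List.map (fun k => PySem.List.slice arr (some ((b :: t').getD k 0))
              (some ((b :: t').getD (k + 1) 0))) (List.range ((b :: t').length - 1)) := by
        simp
      rw [hmap, hlast, ih]
      simp

theorem onesOf_shift (xs : List Int) : ∀ (s : Int),
    (PySem.List.enumerate xs s).filterMap (fun p => if p.2 = 1 then some p.1 else none)
    = ((PySem.List.enumerate xs 0).filterMap (fun p => if p.2 = 1 then some p.1 else none)).map (· + s) := by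
  induction xs with
  | nil => intro s; simp [PySem.List.enumerate]
  | cons x xs ih =>
    intro s
    rw [PySem.List.enumerate_cons, PySem.List.enumerate_cons]
    by_cases hx : x = 1
    · subst hx
      simp [ih (s + 1), ih 1, List.map_map]
      try exact fun a _ => by ring
    · simp [hx, ih (s + 1), ih 1, List.map_map]
      try exact fun a _ => by ring

theorem onesOf_cons (v : Int) (xs : List Int) :
    onesOf (v :: xs) = (if v = 1 then [0] else []) ++ (onesOf xs).map (· + 1) := by
  by_cases hv : v = 1 <;>
    simp [onesOf, PySem.List.enumerate_cons, hv, onesOf_shift xs 1]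

theorem onesOf_nonneg (xs : List Int) : ∀ o ∈ onesOf xs, 0 ≤ o := by
  induction xs with
  | nil => simp [onesOf, PySem.List.enumerate]
  | cons v xs ih =>
    intro o ho
    rw [onesOf_cons] at ho
    rcases List.mem_append.mp ho with h | h
    · split at h <;> simp_all
    · obtain ⟨o', ho', rfl⟩ := List.mem_map.mp h
      have := ih o' ho'; omega

theorem onesOf_eq_nil_iff (xs : List Int) : onesOf xs = [] ↔ ∀ x ∈ xs, x ≠ 1 := by
  induction xs with
  | nil => simp [onesOf, PySem.List.enumerate]
  | cons v xs ih => by_cases hv : v = 1 <;> simp [onesOf_cons, hv, ih]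

theorem onesOf_firstOne (xs : List Int) : ∀ (k : Int) (t : List Int), onesOf xs = k :: t →
    0 ≤ k ∧ xs.takeWhile (· ≠ 1) = xs.take k.toNat ∧ xs.dropWhile (· ≠ 1) = xs.drop k.toNat := by
  induction xs with
  | nil => intro k t h; simp [onesOf, PySem.List.enumerate] at h
  | cons v xs ih =>
    intro k t h
    rw [onesOf_cons] at h
    by_cases hv : v = 1
    · rw [if_pos hv] at h
      obtain ⟨rfl, -⟩ := List.cons_eq_cons.mp h
      simp [hv]
    · rw [if_neg hv, List.nil_append] at h
      cases hos : onesOf xs with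
      | nil => rw [hos] at h; simp at h
      | cons k' t'' =>
        rw [hos] at h
        obtain ⟨rfl, -⟩ := List.cons_eq_cons.mp (by simpa using h)
        obtain ⟨hk', htw, hdw⟩ := ih k' t'' hos
        have hk1 : (k' + 1).toNat = k'.toNat + 1 := by omega
        refine ⟨by omega, ?_, ?_⟩
        · rw [hk1, List.take_succ_cons, List.takeWhile_cons_of_pos (by simpa using hv), htw]
        · rw [hk1, List.drop_succ_cons, List.dropWhile_cons_of_pos (by simpa using hv), hdw]

theorem sliceChain_shift (arr : List Int) (v : Int) :
    ∀ (os : List Int), (∀ o ∈ os, 0 ≤ o) →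
      sliceChain (v :: arr) (os.map (· + 1)) = sliceChain arr os := by
  intro os
  induction os with
  | nil => intro _; rfl
  | cons a t ih =>
    intro hnn
    have ha : 0 ≤ a := hnn a (by simp)
    cases t with
    | nil =>
      simp only [List.map_cons, List.map_nil, sliceChain]
      rw [PySem.List.slice_from _ (by omega : (0:Int) ≤ a + 1),
          PySem.List.slice_from _ ha]
      have : (a + 1).toNat = a.toNat + 1 := by omega
      simp [this]
    | cons b t' =>
      have hb : 0 ≤ b := hnn b (by simp)
      simp only [List.map_cons, sliceChain]
      have h1 : (a + 1).toNat = a.toNat + 1 := by omega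
      have h2 : (b + 1).toNat = b.toNat + 1 := by omega
      have hfst : PySem.List.slice (v :: arr) (some (a + 1)) (some (b + 1))
          = PySem.List.slice arr (some a) (some b) := by
        rw [PySem.List.slice_toNat _ (by omega : (0:Int) ≤ a + 1) (by omega : (0:Int) ≤ b + 1),
            PySem.List.slice_toNat _ ha hb, h1, h2]
        simp
      rw [hfst, show ((b + 1) :: List.map (fun x => x + 1) t')
            = List.map (fun x => x + 1) (b :: t') from rfl,
          ih (fun o ho => hnn o (List.mem_cons_of_mem _ ho))]

theorem chain_groups (xs : List Int) :
    sliceChain xs (onesOf xs) = esGroups (xs.dropWhile (· ≠ 1)) := by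
  induction xs with
  | nil => simp [onesOf, PySem.List.enumerate, sliceChain, esGroups]
  | cons v rest ih =>
    by_cases hv : v = 1
    · subst hv
      rw [onesOf_cons, if_pos rfl, List.singleton_append]
      cases hos : onesOf rest with
      | nil =>
        have hno : ∀ x ∈ rest, x ≠ 1 := (onesOf_eq_nil_iff rest).mp hos
        have htw : rest.takeWhile (· ≠ 1) = rest := List.takeWhile_eq_self_iff.mpr (by simpa using hno)
        have hdw : rest.dropWhile (· ≠ 1) = [] := List.dropWhile_eq_nil_iff.mpr (by simpa using hno)
        rw [List.map_nil, List.dropWhile_cons_of_neg (by simp), esGroups_cons_one, htw, hdw,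
            esGroups_nil, sliceChain, PySem.List.slice_from _ (le_refl 0)]
        simp
      | cons k t' =>
        obtain ⟨hk, htw, -⟩ := onesOf_firstOne rest k t' hos
        rw [List.map_cons, sliceChain, List.dropWhile_cons_of_neg (by simp), esGroups_cons_one]
        have h1 : (k + 1).toNat = k.toNat + 1 := by omega
        have hfst : PySem.List.slice (1 :: rest) (some 0) (some (k + 1))
            = 1 :: rest.takeWhile (· ≠ 1) := by
          rw [PySem.List.slice_toNat _ (le_refl 0) (by omega : (0:Int) ≤ k + 1), htw, h1]
          simp
        have hsnd : sliceChain (1 :: rest) ((k + 1) :: List.map (fun x => x + 1) t')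
            = esGroups (rest.dropWhile (· ≠ 1)) := by
          rw [show ((k + 1) :: List.map (fun x => x + 1) t')
                = List.map (fun x => x + 1) (k :: t') from rfl,
              sliceChain_shift rest 1 (k :: t') (by rw [← hos]; exact onesOf_nonneg rest),
              ← hos, ih]
        rw [hfst, hsnd]
    · rw [onesOf_cons, if_neg hv, List.nil_append,
          sliceChain_shift rest v (onesOf rest) (onesOf_nonneg rest), ih,
          List.dropWhile_cons_of_pos (by simpa using hv)]

theorem onesOf_def (xs : List Int) :
    (PySem.List.enumerate xs).filterMap (fun p => if p.2 = 1 then some p.1 else none) = onesOf xs :=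
  rfl

theorem alt_eq_groups (xs : List Int) :
    euclidian_splitter_alt xs = esGroups (xs.dropWhile (· ≠ 1)) := by
  simp only [euclidian_splitter_alt, onesOf_def, build_res_eq]
  rw [build_eq_chain, chain_groups]

-- ===== VERDICT (by name: the statement is the Claim_ definition above) =====
theorem euclidian_splitter_spec : Claim_equal_euclidian_splitter := by
  intro array _
  unfold Spec_euclidian_splitter
  rw [alt_eq_groups, euclidian_splitter, esLoopA_eq, PySem.List.slice_from_one]
  simp
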